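-- pv_equiv track=rewrite | github.com/DipeshD16/Pyrthon-Proagramming-Examples | upside_down_num_eq.py | is_upside_down_same
-- ===== SOURCE A (Python) =====
-- def is_upside_down_same(n):
--     flip_map = {'0': '0', '1':'1', '6':'9', '8':'8', '9':'6'}
--     s = str(n)
--
--     try:
--         flipped = ''.join(flip_map[c] for c in reversed(s))
--         return flipped == s
--
--     except KeyError:
--         return False
-- ===== SOURCE B (Python) =====
-- def is_upside_down_same(n):
--     flip = {'0': '0', '1': '1', '6': '9', '8': '8', '9': '6'}
--     s = str(n)
--     while s:
--         if flip.get(s[-1]) != s[0]: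
--             return False
--         s = s[1:-1]
--     return True
-- ===== Notes on version B (the rewrite author's own statement) =====
-- stated objective: simpler
-- what changed: B replaces A's build-the-whole-flipped-string-and-compare (with try/except KeyError) by a meet-in-the-middle loop that peels matching end pairs off the string and returns False at the first mismatching or unmappable pair.
import Mathlib
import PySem

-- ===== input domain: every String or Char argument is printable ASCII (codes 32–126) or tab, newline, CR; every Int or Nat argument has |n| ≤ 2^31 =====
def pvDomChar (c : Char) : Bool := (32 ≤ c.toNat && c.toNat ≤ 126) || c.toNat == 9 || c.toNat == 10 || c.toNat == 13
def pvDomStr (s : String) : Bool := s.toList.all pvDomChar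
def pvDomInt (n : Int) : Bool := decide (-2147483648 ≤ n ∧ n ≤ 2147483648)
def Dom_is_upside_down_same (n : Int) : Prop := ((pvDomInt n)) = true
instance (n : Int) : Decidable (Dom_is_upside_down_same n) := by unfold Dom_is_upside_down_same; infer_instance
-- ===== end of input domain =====

-- B peels matching end pairs instead of building the whole flipped string: simpler, early exit.

-- shared helper: the flip_map lookup both Pythons define literally ('0'->'0','1'->'1','6'->'9','8'->'8','9'->'6'; none = absent key)
def flipDigit? (c : Char) : Option Char :=
  if c = '0' then some '0'
  else if c = '1' then some '1'
  else if c = '6' then some '9'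
  else if c = '8' then some '8'
  else if c = '9' then some '6'
  else none

-- ===== PORT A =====
-- ''.join(flip_map[c] for c in reversed(s)) under try/except KeyError: none = the KeyError path
def pvFlipAll : List Char → Option (List Char)
  | [] => some []
  | c :: cs =>
    match flipDigit? c, pvFlipAll cs with
    | some d, some ds => some (d :: ds)
    | _, _ => none

def is_upside_down_same (n : Int) : Bool :=
  let s := (PySem.Int.toStr n).toList
  match pvFlipAll s.reverse with
  | some flipped => flipped == s
  | none => false

-- ===== PORT B =====
-- the while loop of Source B: s[-1] = getLastD, s[0] = head, s[1:-1] = tail.dropLast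
def pvOk : List Char → Bool
  | [] => true
  | c :: rest =>
    if flipDigit? (rest.getLastD c) = some c then pvOk rest.dropLast else false
termination_by s => s.length
decreasing_by simp

def is_upside_down_same_alt (n : Int) : Bool :=
  pvOk (PySem.Int.toStr n).toList

-- ===== PRECONDITION & SPEC =====
def Spec_is_upside_down_same (n : Int) (out : Bool) : Prop := out = is_upside_down_same_alt n
instance (n : Int) (out : Bool) : Decidable (Spec_is_upside_down_same n out) := by unfold Spec_is_upside_down_same; infer_instance

-- ===== CLAIM (what is proved, stated in full; the proofs are below) =====
def Claim_equal_is_upside_down_same : Prop := ∀ (n : Int), Dom_is_upside_down_same n → Spec_is_upside_down_same n (is_upside_down_same n)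

-- ===== LEMMAS AND PROOFS =====

theorem flip_invol {a b : Char} (h : flipDigit? a = some b) : flipDigit? b = some a := by
  unfold flipDigit? at h
  split_ifs at h
  all_goals try cases h
  all_goals subst_vars
  all_goals decide

theorem flipAll_eq_some_iff (l m : List Char) :
    pvFlipAll l = some m ↔ List.Forall₂ (fun a b => flipDigit? a = some b) l m := by
  induction l generalizing m with
  | nil => cases m <;> simp [pvFlipAll]
  | cons c cs ih =>
    cases m with
    | nil =>
      simp only [pvFlipAll]
      cases h1 : flipDigit? c <;> cases h2 : pvFlipAll cs <;> simp
    | cons d ds =>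
      simp only [pvFlipAll, List.forall₂_cons, ← ih]
      cases h1 : flipDigit? c <;> cases h2 : pvFlipAll cs <;> simp_all

theorem forall2_append_iff {R : Char → Char → Prop} (l₁ l₂ m₁ m₂ : List Char)
    (h : l₁.length = m₁.length) :
    List.Forall₂ R (l₁ ++ l₂) (m₁ ++ m₂) ↔ List.Forall₂ R l₁ m₁ ∧ List.Forall₂ R l₂ m₂ := by
  induction l₁ generalizing m₁ with
  | nil => cases m₁ <;> simp_all
  | cons a t ih =>
    cases m₁ with
    | nil => simp at h
    | cons b u =>
      simp only [List.cons_append, List.forall₂_cons, ih u (by simpa using h)]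
      tauto

theorem ok_iff (s : List Char) :
    pvOk s = true ↔ List.Forall₂ (fun a b => flipDigit? a = some b) s.reverse s := by
  induction s using List.bidirectionalRec with
  | nil => rw [pvOk]; simp
  | singleton a =>
    rw [pvOk]
    simp only [List.getLastD, List.dropLast, List.reverse_singleton, List.forall₂_cons]
    split_ifs with h <;> simp_all <;> rw [pvOk]
  | cons_append a l b ih =>
    have hlast : (l ++ [b]).getLastD a = b := by
      simp [List.getLastD_eq_getLast?]
    have hdrop : (l ++ [b]).dropLast = l := by simp
    have hrev : (a :: (l ++ [b])).reverse = b :: (l.reverse ++ [a]) := by simp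
    rw [hrev]
    constructor
    · intro h
      rw [pvOk, hlast, hdrop] at h
      split_ifs at h with hba
      have hab : flipDigit? a = some b := flip_invol hba
      exact List.Forall₂.cons hba
        ((forall2_append_iff l.reverse [a] l [b] (by simp)).2 ⟨(ih.1 h), by simp [hab]⟩)
    · intro h
      rcases h with _ | ⟨hba, htail⟩
      have := (forall2_append_iff l.reverse [a] l [b] (by simp)).1 htail
      rw [pvOk, hlast, hdrop, if_pos hba]
      exact ih.2 this.1

theorem core_eq (s : List Char) :
    (match pvFlipAll s.reverse with
     | some flipped => flipped == s
     | none => false) = pvOk s := by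
  rw [Bool.eq_iff_iff]
  constructor
  · intro h
    cases hf : pvFlipAll s.reverse with
    | none => rw [hf] at h; simp at h
    | some f =>
      rw [hf] at h
      simp only [beq_iff_eq] at h
      subst h
      exact (ok_iff _).2 ((flipAll_eq_some_iff _ _).1 hf)
  · intro h
    have := (flipAll_eq_some_iff s.reverse s).2 ((ok_iff s).1 h)
    rw [this]
    simp

-- ===== VERDICT (by name: the statement is the Claim_ definition above) =====
theorem is_upside_down_same_spec : Claim_equal_is_upside_down_same := by
  intro n _
  unfold Spec_is_upside_down_same is_upside_down_same is_upside_down_same_alt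
  exact core_eq _
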